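-- pv_equiv track=rewrite | github.com/wellswench/test | poly3.py | _skip_string_or_comment_forward
-- ===== SOURCE A (Python) =====
-- def _skip_string_or_comment_forward(code, i):
--     ln = len(code)
--     if i >= ln:
--         return i
--     ch = code[i]
--     if ch == '"':
--         j = i + 1
--         while j < ln:
--             if code[j] == '\\':
--                 j += 2
--                 continue
--             if code[j] == '"':
--                 return j + 1
--             j += 1
--         return ln
--     if ch == '`':
--         j = code.find('`', i+1)
--         return j+1 if j != -1 else ln
--     if ch == "'":
--         j = i + 1
--         while j < ln:
--             if code[j] == '\\':
--                 j += 2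
--                 continue
--             if code[j] == "'":
--                 return j + 1
--             j += 1
--         return ln
--     if code.startswith('//', i):
--         j = code.find('\n', i+2)
--         return j+1 if j != -1 else ln
--     if code.startswith('/*', i):
--         j = code.find('*/', i+2)
--         return j+2 if j != -1 else ln
--     return i
-- ===== SOURCE B (Python) =====
-- def _skip_string_or_comment_forward(code, i):
--     ln = len(code)
--     if i >= ln:
--         return i
--     ch = code[i]
--     if ch == '"' or ch == "'":
--         j = i + 1
--         while True:
--             k = code.find(ch, j)
--             if k == -1:
--                 return ln
--             b = 0
--             p = k - 1
--             while p >= i + 1 and code[p] == '\\':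
--                 b += 1
--                 p -= 1
--             if b % 2 == 0:
--                 return k + 1
--             j = k + 1
--     if ch == '`':
--         j = code.find('`', i+1)
--         return j+1 if j != -1 else ln
--     if code.startswith('//', i):
--         j = code.find('\n', i+2)
--         return j+1 if j != -1 else ln
--     if code.startswith('/*', i):
--         j = code.find('*/', i+2)
--         return j+2 if j != -1 else ln
--     return i
-- ===== Notes on version B (the rewrite author's own statement) =====
-- stated objective: alternative
-- what changed: The char-by-char escape-skipping loops for '"' and "'" are replaced by one shared find-based loop that jumps straight to each candidate closing quote and decides by the parity of the contiguous backslash run before it; the two duplicated quote branches are merged.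
-- outside the precondition, e.g. on _skip_string_or_comment_forward('"a"', -3): A returns 0, B returns 3
import Mathlib
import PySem

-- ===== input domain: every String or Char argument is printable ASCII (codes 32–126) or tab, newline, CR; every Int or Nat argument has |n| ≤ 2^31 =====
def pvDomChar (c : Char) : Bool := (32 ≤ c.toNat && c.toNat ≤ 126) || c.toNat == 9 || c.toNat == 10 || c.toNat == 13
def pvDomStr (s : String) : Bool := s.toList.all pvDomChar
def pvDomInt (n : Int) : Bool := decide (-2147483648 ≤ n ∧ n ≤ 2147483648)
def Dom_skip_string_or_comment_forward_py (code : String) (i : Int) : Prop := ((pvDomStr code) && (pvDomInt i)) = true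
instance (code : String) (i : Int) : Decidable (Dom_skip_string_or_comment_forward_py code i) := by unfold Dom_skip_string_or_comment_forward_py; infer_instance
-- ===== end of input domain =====

-- B merges the two duplicated quote branches and replaces A's char-by-char escape-skipping
-- loop with a find-to-next-quote loop deciding by backslash-run parity; return values only,
-- no mutation. Pre_ restricts to i ≥ 0 (see comment at Pre_).

-- ===== PORT A =====
-- shared low-level helper: Python's str.find(ch, j) for j ≥ 0 (both sources call it)
def findFrom (cs : List Char) (c : Char) (j : Nat) : Option Nat :=
  if j < cs.length then
    if cs.getD j ' ' = c then some j else findFrom cs c (j+1)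
  else none
termination_by cs.length - j

-- Python's str.find("xy", j) for j ≥ 0 (two-character needle)
def find2From (cs : List Char) (a b : Char) (j : Nat) : Option Nat :=
  if j + 1 < cs.length then
    if cs.getD j ' ' = a ∧ cs.getD (j+1) ' ' = b then some j else find2From cs a b (j+1)
  else none
termination_by cs.length - j

-- Python's str.startswith("xy", j) for j ≥ 0
def startsAt2 (cs : List Char) (a b : Char) (j : Nat) : Bool :=
  (cs[j]? = some a) && (cs[j+1]? = some b)

-- A's while-loop over j: backslash skips two, quote returns j+1, else step one
def loopA (cs : List Char) (q : Char) (j : Nat) : Nat :=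
  if j < cs.length then
    if cs.getD j ' ' = '\\' then loopA cs q (j+2)
    else if cs.getD j ' ' = q then j + 1
    else loopA cs q (j+1)
  else cs.length
termination_by cs.length - j

def skip_string_or_comment_forward_py (code : String) (i : Int) : Int :=
  let cs := code.toList
  let ln := cs.length
  if i ≥ (ln : Int) then i
  else
    let ii := i.toNat
    let ch := cs.getD ii ' '
    if ch = '"' then (loopA cs '"' (ii+1) : Int)
    else if ch = '`' then
      match findFrom cs '`' (ii+1) with
      | some j => ((j + 1 : Nat) : Int)
      | none => (ln : Int)
    else if ch = '\'' then (loopA cs '\'' (ii+1) : Int)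
    else if startsAt2 cs '/' '/' ii then
      match findFrom cs '\n' (ii+2) with
      | some j => ((j + 1 : Nat) : Int)
      | none => (ln : Int)
    else if startsAt2 cs '/' '*' ii then
      match find2From cs '*' '/' (ii+2) with
      | some j => ((j + 2 : Nat) : Int)
      | none => (ln : Int)
    else i

-- ===== PORT B =====
-- number of consecutive backslashes ending just below k, not reaching below lo
def bsRun (cs : List Char) (lo k : Nat) : Nat :=
  if lo < k then
    if cs.getD (k-1) ' ' = '\\' then bsRun cs lo (k-1) + 1 else 0
  else 0
termination_by k

theorem findFrom_some_bounds (cs : List Char) (c : Char) (j k : Nat)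
    (h : findFrom cs c j = some k) : j ≤ k ∧ k < cs.length := by
  fun_induction findFrom cs c j with
  | case1 j hlt heq => simp_all
  | case2 j hlt heq ih => have := ih h; omega
  | case3 j hlt => simp_all

-- B's loop: jump to the next candidate quote, decide by backslash-run parity
def scanB (cs : List Char) (q : Char) (lo j : Nat) : Nat :=
  match h : findFrom cs q j with
  | none => cs.length
  | some k =>
      if bsRun cs lo k % 2 = 0 then k + 1
      else scanB cs q lo (k+1)
termination_by cs.length - j
decreasing_by
  have := findFrom_some_bounds cs q j k h
  omega

def skip_string_or_comment_forward_py_alt (code : String) (i : Int) : Int :=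
  let cs := code.toList
  let ln := cs.length
  if i ≥ (ln : Int) then i
  else
    let ii := i.toNat
    let ch := cs.getD ii ' '
    if ch = '"' ∨ ch = '\'' then (scanB cs ch (ii+1) (ii+1) : Int)
    else if ch = '`' then
      match findFrom cs '`' (ii+1) with
      | some j => ((j + 1 : Nat) : Int)
      | none => (ln : Int)
    else if startsAt2 cs '/' '/' ii then
      match findFrom cs '\n' (ii+2) with
      | some j => ((j + 1 : Nat) : Int)
      | none => (ln : Int)
    else if startsAt2 cs '/' '*' ii then
      match find2From cs '*' '/' (ii+2) with
      | some j => ((j + 2 : Nat) : Int)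
      | none => (ln : Int)
    else i

-- ===== PRECONDITION & SPEC =====
-- Pre_ excludes negative i: A raises IndexError when i < -len(code), and for
-- -len(code) ≤ i < 0 Python's negative-index conventions (wraparound in A's
-- subscripting, end-relative starts in B's find) give each program an accidental,
-- equally unspecified result on a start position no forward scanner is meant to take.
def Pre_skip_string_or_comment_forward_py (code : String) (i : Int) : Prop := 0 ≤ i
instance (code : String) (i : Int) : Decidable (Pre_skip_string_or_comment_forward_py code i) := by
  unfold Pre_skip_string_or_comment_forward_py; infer_instance

def pvWitness_skip_string_or_comment_forward_py : String × Int := ("\"a\\\"b\" rest", 0)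

def Spec_skip_string_or_comment_forward_py (code : String) (i : Int) (out : Int) : Prop := out = skip_string_or_comment_forward_py_alt code i
instance (code : String) (i : Int) (out : Int) : Decidable (Spec_skip_string_or_comment_forward_py code i out) := by unfold Spec_skip_string_or_comment_forward_py; infer_instance

-- ===== CLAIM (what is proved, stated in full; the proofs are below) =====
def Claim_equal_skip_string_or_comment_forward_py : Prop := ∀ (code : String) (i : Int), Dom_skip_string_or_comment_forward_py code i → Pre_skip_string_or_comment_forward_py code i → Spec_skip_string_or_comment_forward_py code i (skip_string_or_comment_forward_py code i)

-- ===== LEMMAS AND PROOFS =====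

theorem findFrom_none (cs : List Char) (c : Char) (j : Nat)
    (h : findFrom cs c j = none) :
    ∀ p, j ≤ p → p < cs.length → cs.getD p ' ' ≠ c := by
  fun_induction findFrom cs c j with
  | case1 j hlt heq => simp_all
  | case2 j hlt heq ih =>
      intro p hjp hp
      rcases Nat.eq_or_lt_of_le hjp with rfl | h'
      · exact heq
      · exact ih h p h' hp
  | case3 j hlt => intro p hjp hp; omega

theorem findFrom_some (cs : List Char) (c : Char) (j k : Nat)
    (h : findFrom cs c j = some k) :
    cs.getD k ' ' = c ∧ ∀ p, j ≤ p → p < k → cs.getD p ' ' ≠ c := by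
  fun_induction findFrom cs c j with
  | case1 j hlt heq =>
      simp only [Option.some.injEq] at h; subst h
      exact ⟨heq, by intro p h1 h2; omega⟩
  | case2 j hlt heq ih =>
      obtain ⟨h1, h2⟩ := ih h
      have hb := findFrom_some_bounds cs c (j+1) k h
      refine ⟨h1, ?_⟩
      intro p hjp hp
      rcases Nat.eq_or_lt_of_le hjp with rfl | h'
      · exact heq
      · exact h2 p h' hp
  | case3 j hlt => simp_all

theorem bsRun_spec (cs : List Char) (lo k : Nat) (hlk : lo ≤ k) :
    bsRun cs lo k ≤ k - lo ∧
    (∀ p, k - bsRun cs lo k ≤ p → p < k → cs.getD p ' ' = '\\') ∧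
    (k - bsRun cs lo k = lo ∨ cs.getD (k - bsRun cs lo k - 1) ' ' ≠ '\\') := by
  fun_induction bsRun cs lo k with
  | case1 k hlt heq ih =>
      obtain ⟨ih1, ih2, ih3⟩ := ih (by omega)
      refine ⟨by omega, ?_, ?_⟩
      · intro p h1 h2
        rcases Nat.lt_or_ge p (k-1) with h' | h'
        · exact ih2 p (by omega) h'
        · have : p = k - 1 := by omega
          subst this; exact heq
      · have : k - (bsRun cs lo (k-1) + 1) = (k-1) - bsRun cs lo (k-1) := by omega
        rw [this]; exact ih3
  | case2 k hlt heq =>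
      refine ⟨by omega, by intro p h1 h2; omega, ?_⟩
      right
      have : k - 0 - 1 = k - 1 := by omega
      rw [this]; exact heq
  | case3 k hlt =>
      have : k = lo := by omega
      subst this
      exact ⟨by omega, by intro p h1 h2; omega, Or.inl (by omega)⟩

-- A's loop reaches the end when no closing quote remains
theorem loopA_no_q (cs : List Char) (q : Char) (j : Nat)
    (h : ∀ p, j ≤ p → p < cs.length → cs.getD p ' ' ≠ q) :
    loopA cs q j = cs.length := by
  fun_induction loopA cs q j with
  | case1 j hlt hbs ih => exact ih (by intro p h1 h2; exact h p (by omega) h2)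
  | case2 j hlt hbs hq => exact absurd hq (h j (le_refl j) hlt)
  | case3 j hlt hbs hq ih => exact ih (by intro p h1 h2; exact h p (by omega) h2)
  | case4 j hlt => rfl

-- A's loop across a maximal backslash run of length b ending at the quote position k
theorem loopA_run (cs : List Char) (q : Char) (k : Nat)
    (hk : k < cs.length) (hq : cs.getD k ' ' = q) (hqb : q ≠ '\\') :
    ∀ b, b ≤ k → (∀ p, k - b ≤ p → p < k → cs.getD p ' ' = '\\') →
      loopA cs q (k - b) = if b % 2 = 0 then k + 1 else loopA cs q (k + 1) := by
  intro b
  induction b using Nat.strong_induction_on with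
  | _ b ih =>
    intro hbk hrun
    match b with
    | 0 =>
        simp only [Nat.sub_zero]
        rw [loopA]
        simp only [hk, if_pos]
        rw [hq, if_neg hqb, if_pos rfl]
    | 1 =>
        have h1 : cs.getD (k-1) ' ' = '\\' := hrun (k-1) (by omega) (by omega)
        rw [loopA]
        have : k - 1 < cs.length := by omega
        rw [if_pos this, if_pos h1]
        have : k - 1 + 2 = k + 1 := by omega
        rw [this]
        simp
    | b + 2 =>
        have h1 : cs.getD (k-(b+2)) ' ' = '\\' := hrun _ (le_refl _) (by omega)
        rw [loopA]
        have hlt2 : k - (b+2) < cs.length := by omega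
        rw [if_pos hlt2, if_pos h1]
        have he : k - (b+2) + 2 = k - b := by omega
        rw [he]
        have := ih b (by omega) (by omega) (by intro p h1' h2; exact hrun p (by omega) h2)
        rw [this]
        have : (b + 2) % 2 = b % 2 := by omega
        rw [this]

-- A's loop from j up to the run start, then across the run
theorem loopA_skip (cs : List Char) (q : Char) (k b : Nat)
    (hk : k < cs.length) (hq : cs.getD k ' ' = q) (hqb : q ≠ '\\')
    (hbk : b ≤ k)
    (hrun : ∀ p, k - b ≤ p → p < k → cs.getD p ' ' = '\\') :
    ∀ n j, k - b - j = n → j ≤ k - b →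
      (∀ p, j ≤ p → p < k → cs.getD p ' ' ≠ q) →
      (k - b = j ∨ cs.getD (k - b - 1) ' ' ≠ '\\') →
      loopA cs q j = if b % 2 = 0 then k + 1 else loopA cs q (k + 1) := by
  intro n
  induction n using Nat.strong_induction_on with
  | _ n ih =>
    intro j hn hj hnoq hmax
    rcases Nat.eq_or_lt_of_le hj with heq | hlt
    · subst heq
      exact loopA_run cs q k hk hq hqb b hbk hrun
    · have hmax' : cs.getD (k - b - 1) ' ' ≠ '\\' := by
        rcases hmax with h | h
        · omega
        · exact h
      have hjlen : j < cs.length := by omega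
      rw [loopA, if_pos hjlen]
      by_cases hb : cs.getD j ' ' = '\\'
      · have hne : j ≠ k - b - 1 := by
          intro h; rw [h] at hb; exact hmax' hb
        have h2 : j + 2 ≤ k - b := by omega
        rw [if_pos hb]
        exact ih (k - b - (j+2)) (by omega) (j+2) rfl h2
          (by intro p h1 h2'; exact hnoq p (by omega) h2') (Or.inr hmax')
      · rw [if_neg hb, if_neg (hnoq j le_rfl (by omega))]
        exact ih (k - b - (j+1)) (by omega) (j+1) rfl (by omega)
          (by intro p h1 h2'; exact hnoq p (by omega) h2') (Or.inr hmax')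

-- main loop equivalence: A's escape-skipping walk equals B's find/parity loop
theorem scanB_eq_loopA (cs : List Char) (q : Char) (hqb : q ≠ '\\') :
    ∀ n j lo, cs.length - j = n → lo ≤ j → (j = lo ∨ cs.getD (j-1) ' ' ≠ '\\') →
      loopA cs q j = scanB cs q lo j := by
  intro n
  induction n using Nat.strong_induction_on with
  | _ n ih =>
    intro j lo hn hlo hinv
    rw [scanB]
    cases hf : findFrom cs q j with
    | none =>
        simp only
        exact loopA_no_q cs q j (findFrom_none cs q j hf)
    | some k =>
        simp only
        obtain ⟨hjk, hklen⟩ := findFrom_some_bounds cs q j k hf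
        obtain ⟨hqk, hnoq⟩ := findFrom_some cs q j k hf
        have hlk : lo ≤ k := le_trans hlo hjk
        obtain ⟨hb1, hb2, hb3⟩ := bsRun_spec cs lo k hlk
        have hjkb : j ≤ k - bsRun cs lo k := by
          by_contra hcon
          push Not at hcon
          have hj1 : j ≥ 1 := by omega
          have : cs.getD (j-1) ' ' = '\\' := hb2 (j-1) (by omega) (by omega)
          rcases hinv with h | h
          · omega
          · exact h this
        have hmax : k - bsRun cs lo k = j ∨ cs.getD (k - bsRun cs lo k - 1) ' ' ≠ '\\' := by
          rcases hb3 with h | h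
          · left; omega
          · right; exact h
        have hstep := loopA_skip cs q k (bsRun cs lo k) hklen hqk hqb (by omega) hb2
          (k - bsRun cs lo k - j) j rfl hjkb hnoq hmax
        rw [hstep]
        by_cases hpar : bsRun cs lo k % 2 = 0
        · rw [if_pos hpar, if_pos hpar]
        · rw [if_neg hpar, if_neg hpar]
          exact ih (cs.length - (k+1)) (by omega) (k+1) lo rfl (by omega)
            (Or.inr (by
              have hk1 : k + 1 - 1 = k := by omega
              rw [hk1, hqk]; exact hqb))

-- ===== VERDICT (by name: the statement is the Claim_ definition above) =====
theorem skip_string_or_comment_forward_py_spec : Claim_equal_skip_string_or_comment_forward_py := by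
  intro code i _ hpre
  unfold Spec_skip_string_or_comment_forward_py
  unfold skip_string_or_comment_forward_py skip_string_or_comment_forward_py_alt
  have hquote : ∀ q : Char, q = '"' ∨ q = '\'' →
      (loopA code.toList q (i.toNat+1) : Int) = (scanB code.toList q (i.toNat+1) (i.toNat+1) : Int) := by
    intro q hqv
    have hqb : q ≠ '\\' := by rcases hqv with rfl | rfl <;> decide
    exact congrArg Int.ofNat
      (scanB_eq_loopA code.toList q hqb (code.toList.length - (i.toNat+1)) (i.toNat+1) (i.toNat+1)
        rfl le_rfl (Or.inl rfl))
  dsimp only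
  split_ifs with h1 h2 h3 h4 h5 h6 h7 h8 h9 h10 h11 h12 h13 h14 h15 h16 <;>
    first
      | rfl
      | (exact hquote _ (Or.inl (by assumption)))
      | (exact hquote _ (Or.inr (by assumption)))
      | simp_all
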